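-- pv_equiv track=rewrite | github.com/Janyl1105/Cars_project_classification | src/data/preprocessing.py | infer_type_from_name
-- ===== SOURCE A (Python) =====
-- def infer_type_from_name(name: str) -> str:
--     value = name.lower()
--     if "suv" in value or "sport utility" in value:
--         return "suv"
--     if "hatchback" in value:
--         return "hatchback"
--     if "wagon" in value:
--         return "wagon"
--     if "coupe" in value:
--         return "coupe"
--     if "convertible" in value or "cabriolet" in value:
--         return "convertible"
--     if "van" in value or "minivan" in value:
--         return "van"
--     if "pickup" in value or "pick-up" in value:
--         return "pickup"
--     if "truck" in value:
--         return "truck"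
--     if any(token in value for token in ["911", "ferrari", "lamborghini", "mclaren", "gt-r", "gtr", "corvette"]):
--         return "sports"
--     if "sedan" in value:
--         return "sedan"
--     return "other"
-- ===== SOURCE B (Python) =====
-- # B: two staged passes instead of a first-match cascade.
-- # Pass 1 collects EVERY label whose keywords occur in the name;
-- # pass 2 resolves the winner by a fixed priority order.
-- # Correct because each keyword belongs to exactly one label, so the
-- # highest-priority matched label is exactly the first rule A's cascade hits.
--
-- KEYWORD_LABELS = [
--     ("suv", "suv"), ("sport utility", "suv"),
--     ("hatchback", "hatchback"),
--     ("wagon", "wagon"),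
--     ("coupe", "coupe"),
--     ("convertible", "convertible"), ("cabriolet", "convertible"),
--     ("van", "van"), ("minivan", "van"),
--     ("pickup", "pickup"), ("pick-up", "pickup"),
--     ("truck", "truck"),
--     ("911", "sports"), ("ferrari", "sports"), ("lamborghini", "sports"),
--     ("mclaren", "sports"), ("gt-r", "sports"), ("gtr", "sports"),
--     ("corvette", "sports"),
--     ("sedan", "sedan"),
-- ]
--
-- PRIORITY = ["suv", "hatchback", "wagon", "coupe", "convertible",
--             "van", "pickup", "truck", "sports", "sedan"]
--
--
-- def infer_type_from_name(name: str) -> str: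
--     value = name.lower()
--     matched = [label for kw, label in KEYWORD_LABELS if kw in value]
--     for label in PRIORITY:
--         if label in matched:
--             return label
--     return "other"
-- ===== Notes on version B (the rewrite author's own statement) =====
-- stated objective: alternative
-- what changed: B works in two staged passes: it first collects the full set of matched labels from a keyword-to-label map, then resolves the winner by a separate fixed priority list, instead of A's short-circuiting first-match if-cascade.
import Mathlib
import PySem

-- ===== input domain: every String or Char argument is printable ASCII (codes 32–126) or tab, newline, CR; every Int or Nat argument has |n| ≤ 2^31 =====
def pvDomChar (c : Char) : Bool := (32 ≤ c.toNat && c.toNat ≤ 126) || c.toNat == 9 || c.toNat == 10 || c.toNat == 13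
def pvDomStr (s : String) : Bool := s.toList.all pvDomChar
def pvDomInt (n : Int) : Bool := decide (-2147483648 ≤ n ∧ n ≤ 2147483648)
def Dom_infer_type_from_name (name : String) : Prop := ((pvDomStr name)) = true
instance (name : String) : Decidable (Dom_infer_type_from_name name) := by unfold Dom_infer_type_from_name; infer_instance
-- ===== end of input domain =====

-- B replaces A's short-circuiting if-cascade by two staged passes: collect all matched
-- labels from a keyword-to-label map, then resolve by a separate priority list (objective: alternative).

-- ===== PORT A =====
def infer_type_from_name (name : String) : String :=
  let value := PySem.Str.lower name
  if PySem.Str.isIn "suv" value || PySem.Str.isIn "sport utility" value then "suv"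
  else if PySem.Str.isIn "hatchback" value then "hatchback"
  else if PySem.Str.isIn "wagon" value then "wagon"
  else if PySem.Str.isIn "coupe" value then "coupe"
  else if PySem.Str.isIn "convertible" value || PySem.Str.isIn "cabriolet" value then "convertible"
  else if PySem.Str.isIn "van" value || PySem.Str.isIn "minivan" value then "van"
  else if PySem.Str.isIn "pickup" value || PySem.Str.isIn "pick-up" value then "pickup"
  else if PySem.Str.isIn "truck" value then "truck"
  else if (["911", "ferrari", "lamborghini", "mclaren", "gt-r", "gtr", "corvette"].any
      fun token => PySem.Str.isIn token value) then "sports"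
  else if PySem.Str.isIn "sedan" value then "sedan"
  else "other"

-- ===== PORT B =====
def pvKeywordLabels : List (String × String) :=
  [ ("suv", "suv"), ("sport utility", "suv"),
    ("hatchback", "hatchback"),
    ("wagon", "wagon"),
    ("coupe", "coupe"),
    ("convertible", "convertible"), ("cabriolet", "convertible"),
    ("van", "van"), ("minivan", "van"),
    ("pickup", "pickup"), ("pick-up", "pickup"),
    ("truck", "truck"),
    ("911", "sports"), ("ferrari", "sports"), ("lamborghini", "sports"),
    ("mclaren", "sports"), ("gt-r", "sports"), ("gtr", "sports"),
    ("corvette", "sports"),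
    ("sedan", "sedan") ]

def pvPriority : List String :=
  ["suv", "hatchback", "wagon", "coupe", "convertible", "van", "pickup", "truck", "sports", "sedan"]

def infer_type_from_name_alt (name : String) : String :=
  let value := PySem.Str.lower name
  let matched := (pvKeywordLabels.filter (fun p => PySem.Str.isIn p.1 value)).map Prod.snd
  match pvPriority.find? (fun label => matched.contains label) with
  | some label => label
  | none => "other"

-- ===== PRECONDITION & SPEC =====
def Spec_infer_type_from_name (name : String) (out : String) : Prop := out = infer_type_from_name_alt name
instance (name : String) (out : String) : Decidable (Spec_infer_type_from_name name out) := by unfold Spec_infer_type_from_name; infer_instance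

-- ===== CLAIM (what is proved, stated in full; the proofs are below) =====
def Claim_equal_infer_type_from_name : Prop := ∀ (name : String), Dom_infer_type_from_name name → Spec_infer_type_from_name name (infer_type_from_name name)

-- ===== LEMMAS AND PROOFS =====

-- ===== VERDICT (by name: the statement is the Claim_ definition above) =====
set_option maxHeartbeats 1000000 in
theorem infer_type_from_name_spec : Claim_equal_infer_type_from_name := by
  intro name _
  unfold Spec_infer_type_from_name infer_type_from_name infer_type_from_name_alt
  simp only [List.find?, pvKeywordLabels, pvPriority, List.any_cons, List.any_nil,
    Bool.or_false]
  split_ifs <;> simp_all
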